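-- pv_equiv track=rewrite | github.com/SillyPuffin/CipherChallenge | scripts/keyword.py | swapLetters
-- ===== SOURCE A (Python) =====
-- def swapLetters(String, SwapList):
--     #generate individual letter list with a zero to check if changed
--     newString  = [(letter, 0) for letter in String]
--
--     for item in SwapList:
--         for index,letter in enumerate(newString):
--             if letter[0] == item[0] and letter[1] == 0:
--                 newString[index] = (item[1],1)
--
--     joinedString = ''
--     for let in newString:
--         joinedString += let[0]
--
--
--     return joinedString
-- ===== SOURCE B (Python) =====
-- def swapLetters(String, SwapList):
--     out = []
--     for ch in String:
--         rep = ch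
--         for key, val in SwapList:
--             if key == ch:
--                 rep = val
--                 break
--         out.append(rep)
--     return ''.join(out)
-- ===== Notes on version B (the rewrite author's own statement) =====
-- stated objective: idiomatic
-- what changed: B iterates the string once and scans the rule list per character with an early break (first matching rule wins), instead of A's rule-major full sweeps that rebuild a maintained (letter, changed-flag) tuple list and then concatenate by repeated string +=.
import Mathlib
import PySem

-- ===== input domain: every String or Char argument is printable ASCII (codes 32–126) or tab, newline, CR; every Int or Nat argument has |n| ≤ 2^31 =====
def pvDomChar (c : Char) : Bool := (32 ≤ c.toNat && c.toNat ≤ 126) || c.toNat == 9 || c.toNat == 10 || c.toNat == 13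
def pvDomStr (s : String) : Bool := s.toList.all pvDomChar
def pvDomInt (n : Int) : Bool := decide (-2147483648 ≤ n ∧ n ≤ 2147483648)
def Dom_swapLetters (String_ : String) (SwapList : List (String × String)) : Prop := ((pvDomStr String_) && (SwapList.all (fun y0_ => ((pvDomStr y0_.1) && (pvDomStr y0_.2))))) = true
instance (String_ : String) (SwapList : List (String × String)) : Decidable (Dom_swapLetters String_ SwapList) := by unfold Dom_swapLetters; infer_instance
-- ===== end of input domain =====

-- B is a character-major single pass with an early-break first-rule scan, replacing A's
-- rule-major sweeps over a (letter, changed-flag) tuple list; same cost, plainer structure.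

-- ===== PORT A =====
-- one full sweep of the tuple list for one swap rule ('for index,letter in enumerate(newString): …')
def swapStepA (item : String × String) (st : List (String × Nat)) : List (String × Nat) :=
  st.map (fun letter => if letter.1 == item.1 && letter.2 == 0 then (item.2, 1) else letter)

def swapLetters (String_ : String) (SwapList : List (String × String)) : String :=
  -- newString = [(letter, 0) for letter in String]
  let newString := String_.toList.map (fun c => (String.ofList [c], (0 : Nat)))
  -- for item in SwapList: full sweep
  let newString := SwapList.foldl (fun st item => swapStepA item st) newString
  -- joinedString accumulation loop
  newString.foldl (fun acc l => acc ++ l.1) ""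

-- ===== PORT B =====
-- inner scan with early break: first pair whose key equals the character, else keep it
def repOf (ch : Char) : List (String × String) → String
  | [] => String.ofList [ch]
  | (k, v) :: rest => if k == String.ofList [ch] then v else repOf ch rest

def swapLetters_alt (String_ : String) (SwapList : List (String × String)) : String :=
  PySem.Str.join "" (String_.toList.map (fun ch => repOf ch SwapList))

-- ===== PRECONDITION & SPEC =====
def Spec_swapLetters (String_ : String) (SwapList : List (String × String)) (out : String) : Prop := out = swapLetters_alt String_ SwapList
instance (String_ : String) (SwapList : List (String × String)) (out : String) : Decidable (Spec_swapLetters String_ SwapList out) := by unfold Spec_swapLetters; infer_instance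

-- ===== CLAIM (what is proved, stated in full; the proofs are below) =====
def Claim_equal_swapLetters : Prop := ∀ (String_ : String) (SwapList : List (String × String)), Dom_swapLetters String_ SwapList → Spec_swapLetters String_ SwapList (swapLetters String_ SwapList)

-- ===== LEMMAS AND PROOFS =====

-- A's rule-major fold of per-rule sweeps = independent per-element folds (map/foldl exchange)
theorem foldl_sweep_eq_map :
    ∀ (rules : List (String × String)) (l : List (String × Nat)),
      rules.foldl
          (fun st item =>
            st.map (fun letter => if letter.1 == item.1 && letter.2 == 0 then (item.2, 1) else letter)) l
        = l.map (fun x =>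
            rules.foldl
              (fun (y : String × Nat) item =>
                if y.1 == item.1 && y.2 == 0 then (item.2, 1) else y) x) := by
  intro rules
  induction rules with
  | nil => intro l; simp
  | cons r rs ih =>
    intro l
    simp only [List.foldl_cons, ih, List.map_map]
    rfl

-- once the flag is set, later rules leave the element unchanged
theorem foldl_locked (rules : List (String × String)) (v : String) :
    rules.foldl
      (fun (y : String × Nat) item =>
        if y.1 == item.1 && y.2 == 0 then (item.2, 1) else y) (v, 1) = (v, 1) := by
  induction rules with
  | nil => rfl
  | cons r rs ih => simpa using ih

-- the per-element fold of A computes B's first-match scan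
theorem foldl_elem_eq_repOf (ch : Char) :
    ∀ (rules : List (String × String)),
      (rules.foldl
        (fun (y : String × Nat) item =>
          if y.1 == item.1 && y.2 == 0 then (item.2, 1) else y)
        (String.ofList [ch], 0)).1 = repOf ch rules := by
  intro rules
  induction rules with
  | nil => rfl
  | cons r rs ih =>
    obtain ⟨k, v⟩ := r
    rw [List.foldl_cons]
    by_cases h : String.ofList [ch] = k
    · subst h
      have hstep :
          (if ((String.ofList [ch] == String.ofList [ch]) && ((0 : Nat) == 0)) = true
            then (v, (1 : Nat)) else (String.ofList [ch], 0)) = (v, 1) := by simp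
      rw [hstep, foldl_locked]
      simp [repOf]
    · have hb : (String.ofList [ch] == k) = false := by simp [h]
      have hb' : (k == String.ofList [ch]) = false := by simp [Ne.symm h]
      simpa [repOf, hb, hb'] using ih

-- Str.join with empty separator peels one string off the front
theorem join_empty_cons (x : String) (xs : List String) :
    PySem.Str.join "" (x :: xs) = x ++ PySem.Str.join "" xs := by
  apply String.ext
  simp [PySem.Str.join, PySem.Chars.join, List.intercalate]
  induction xs with
  | nil => simp
  | cons y ys ih => simp_all

-- the += join loop equals Str.join "" on the projected strings
theorem foldl_append_eq_join :
    ∀ (L : List (String × Nat)) (acc : String),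
      L.foldl (fun a l => a ++ l.1) acc = acc ++ PySem.Str.join "" (L.map Prod.fst) := by
  intro L
  induction L with
  | nil =>
    intro acc
    apply String.ext
    simp [PySem.Str.join, PySem.Chars.join, List.intercalate]
  | cons x xs ih =>
    intro acc
    rw [List.foldl_cons, ih, List.map_cons, join_empty_cons, String.append_assoc]

-- ===== VERDICT (by name: the statement is the Claim_ definition above) =====
theorem swapLetters_spec : Claim_equal_swapLetters := by
  intro S SL _
  show swapLetters S SL = swapLetters_alt S SL
  simp only [swapLetters, swapLetters_alt, swapStepA]
  rw [foldl_sweep_eq_map, foldl_append_eq_join, List.map_map]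
  simp only [List.map_map]
  have e : ∀ t : String, "" ++ t = t := fun t => by simp
  rw [e]
  refine congrArg _ (List.map_congr_left fun ch _ => ?_)
  simpa [Function.comp] using foldl_elem_eq_repOf ch SL
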